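-- pv_equiv track=rewrite | github.com/KingShark-vcg/GiaiThuat | TestCuoiKi/DoDai1.py | so_so_1
-- ===== SOURCE A (Python) =====
-- def so_so_1(n, k, seq):
--     max_ones = 0
--     cur_ones = 0
--     for i in range(k):
--         if seq[i] == 1:
--             cur_ones += 1
--     max_ones = cur_ones
--     for i in range(k, n):
--         if seq[i - k] == 1:
--             cur_ones -= 1
--         if seq[i] == 1:
--             cur_ones += 1
--         max_ones = max(max_ones, cur_ones)
--     return max_ones
-- ===== SOURCE B (Python) =====
-- def so_so_1(n, k, seq):
--     P = [0]
--     c = 0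
--     for x in seq:
--         if x == 1:
--             c += 1
--         P.append(c)
--     best = P[k]
--     for s in range(1, n - k + 1):
--         best = max(best, P[s + k] - P[s])
--     return best
-- ===== Notes on version B (the rewrite author's own statement) =====
-- stated objective: alternative
-- what changed: Replaces the incremental add/subtract sliding window with a prefix-count table built in one pass, then a max over window sums P[s+k]-P[s].
-- outside the precondition, e.g. on so_so_1(-2, -1, [1]): A returns 0, B returns 1
import Mathlib
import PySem

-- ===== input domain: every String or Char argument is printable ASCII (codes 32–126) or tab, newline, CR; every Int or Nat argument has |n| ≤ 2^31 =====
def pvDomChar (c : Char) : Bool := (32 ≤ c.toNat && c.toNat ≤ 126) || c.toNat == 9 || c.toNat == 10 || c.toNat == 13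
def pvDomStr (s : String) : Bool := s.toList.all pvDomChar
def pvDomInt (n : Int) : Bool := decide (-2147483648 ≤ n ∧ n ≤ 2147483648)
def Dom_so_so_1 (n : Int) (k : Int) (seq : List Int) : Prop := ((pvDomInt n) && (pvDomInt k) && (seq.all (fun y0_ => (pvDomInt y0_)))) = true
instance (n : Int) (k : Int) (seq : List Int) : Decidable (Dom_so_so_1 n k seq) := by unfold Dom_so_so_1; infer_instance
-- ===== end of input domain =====

-- B replaces A's incremental add/subtract sliding window by a prefix-count table plus a max over window sums P[s+k]-P[s]; same cost, different structure (objective: alternative).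


-- ===== PORT A =====
def so_so_1 (n : Int) (k : Int) (seq : List Int) : Int :=
  let cur := (PySem.List.pyRange 0 k 1).foldl
      (fun cur i => if PySem.List.pyGetD seq i 0 == 1 then cur + 1 else cur) 0
  let st := (PySem.List.pyRange k n 1).foldl
      (fun (st : Int × Int) i =>
        let c1 := if PySem.List.pyGetD seq (i - k) 0 == 1 then st.2 - 1 else st.2
        let c2 := if PySem.List.pyGetD seq i 0 == 1 then c1 + 1 else c1
        (max st.1 c2, c2)) (cur, cur)
  st.1

-- ===== PORT B =====
def so_so_1_alt (n : Int) (k : Int) (seq : List Int) : Int :=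
  let pc := seq.foldl
      (fun (st : List Int × Int) x =>
        let c := if x == 1 then st.2 + 1 else st.2
        (st.1 ++ [c], c)) ([0], 0)
  let P := pc.1
  (PySem.List.pyRange 1 (n - k + 1) 1).foldl
      (fun best s => max best (PySem.List.pyGetD P (s + k) 0 - PySem.List.pyGetD P s 0))
      (PySem.List.pyGetD P k 0)

-- ===== PRECONDITION & SPEC =====
-- Pre_ excludes negative k, where Python's negative-index wraparound (or two empty loops) makes A's result an accident of indexing, and k or n exceeding len(seq), where A raises IndexError.
def Pre_so_so_1 (n : Int) (k : Int) (seq : List Int) : Prop :=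
  0 ≤ k ∧ k ≤ (seq.length : Int) ∧ n ≤ (seq.length : Int)
instance (n : Int) (k : Int) (seq : List Int) : Decidable (Pre_so_so_1 n k seq) := by unfold Pre_so_so_1; infer_instance
def pvWitness_so_so_1 : Int × Int × List Int := (4, 2, [1, 0, 1, 1])

def Spec_so_so_1 (n : Int) (k : Int) (seq : List Int) (out : Int) : Prop := out = so_so_1_alt n k seq
instance (n : Int) (k : Int) (seq : List Int) (out : Int) : Decidable (Spec_so_so_1 n k seq out) := by unfold Spec_so_so_1; infer_instance

-- ===== CLAIM (what is proved, stated in full; the proofs are below) =====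
def Claim_equal_so_so_1 : Prop := ∀ (n : Int) (k : Int) (seq : List Int), Dom_so_so_1 n k seq → Pre_so_so_1 n k seq → Spec_so_so_1 n k seq (so_so_1 n k seq)

-- ===== LEMMAS AND PROOFS =====

-- number of ones among the first m elements of seq
def pvCnt (seq : List Int) (m : Nat) : Int := ((seq.take m).count 1 : Int)

theorem pvCnt_succ (seq : List Int) (m : Nat) (h : m < seq.length) :
    pvCnt seq (m + 1) = pvCnt seq m + (if seq[m] == 1 then 1 else 0) := by
  unfold pvCnt
  rw [List.take_add_one, List.getElem?_eq_getElem h]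
  simp only [Option.toList_some, List.count_append, List.count_cons, List.count_nil]
  push_cast
  split <;> simp

-- B's first loop builds exactly the prefix-count table
theorem pvBuildP (l : List Int) :
    l.foldl (fun (st : List Int × Int) x =>
        let c := if x == 1 then st.2 + 1 else st.2
        (st.1 ++ [c], c)) ([0], 0)
    = ((List.range (l.length + 1)).map (fun m => pvCnt l m), pvCnt l l.length) := by
  induction l using List.reverseRecOn with
  | nil => simp [pvCnt]
  | append_singleton l x ih =>
    rw [List.foldl_append, ih]
    have hcnt : ∀ m : Nat, m ≤ l.length → pvCnt (l ++ [x]) m = pvCnt l m := by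
      intro m hm; unfold pvCnt; rw [List.take_append_of_le_length hm]
    have hlast : pvCnt (l ++ [x]) (l.length + 1)
        = if x == 1 then pvCnt l l.length + 1 else pvCnt l l.length := by
      unfold pvCnt
      have ht : (l ++ [x]).take (l.length + 1) = l ++ [x] := by
        apply List.take_of_length_le; simp
      rw [ht, List.count_append, List.take_of_length_le (le_refl _)]
      simp [List.count_cons]
      split <;> omega
    simp only [List.length_append, List.length_cons, List.length_nil, List.foldl_cons,
      List.foldl_nil]
    rw [List.range_succ (n := l.length + 1), List.map_append]
    have hmap : List.map (fun m => pvCnt (l ++ [x]) m) (List.range (l.length + 1))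
        = List.map (fun m => pvCnt l m) (List.range (l.length + 1)) := by
      apply List.map_congr_left
      intro m hm
      exact hcnt m (by simpa using Nat.lt_succ_iff.mp (List.mem_range.mp hm))
    rw [hmap]
    simp [hlast]

-- A's first loop counts the ones among the first m elements
theorem pvAfirst (seq : List Int) (m : Nat) (h : m ≤ seq.length) :
    (PySem.List.pyRange 0 (m : Int) 1).foldl
      (fun cur i => if PySem.List.pyGetD seq i 0 == 1 then cur + 1 else cur) 0
    = pvCnt seq m := by
  induction m with
  | zero => simp [pvCnt]
  | succ m ih =>
    have hm : m < seq.length := h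
    rw [show ((m + 1 : Nat) : Int) = (m : Int) + 1 by push_cast; ring,
      PySem.List.pyRange_one_succ_right (by positivity), List.foldl_append]
    rw [ih (le_of_lt hm), pvCnt_succ seq m hm]
    simp [List.getElem?_eq_getElem hm]
    split <;> simp

-- A's second loop: sliding-window invariant (mx, cur) after d steps past k
theorem pvAloop (seq : List Int) (kn d : Nat) (h : kn + d ≤ seq.length) :
    (PySem.List.pyRange (kn : Int) ((kn : Int) + (d : Int)) 1).foldl
      (fun (st : Int × Int) i =>
        let c1 := if PySem.List.pyGetD seq (i - (kn : Int)) 0 == 1 then st.2 - 1 else st.2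
        let c2 := if PySem.List.pyGetD seq i 0 == 1 then c1 + 1 else c1
        (max st.1 c2, c2)) (pvCnt seq kn, pvCnt seq kn)
    = (((List.range d).map (fun j => pvCnt seq (j + 1 + kn) - pvCnt seq (j + 1))).foldl max (pvCnt seq kn),
       pvCnt seq (d + kn) - pvCnt seq d) := by
  induction d with
  | zero => simp [PySem.List.pyRange_one_eq_nil, pvCnt]
  | succ d ih =>
    have hd : kn + d ≤ seq.length := by omega
    have hdlen : d < seq.length := by omega
    have hkdlen : kn + d < seq.length := by omega
    rw [show ((kn : Int) + ((d + 1 : Nat) : Int)) = ((kn : Int) + (d : Int)) + 1 by push_cast; ring,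
      PySem.List.pyRange_one_succ_right (by omega), List.foldl_append, ih hd]
    rw [List.range_succ, List.map_append, List.foldl_append]
    simp only [List.foldl_cons, List.foldl_nil, List.map_cons, List.map_nil]
    have e1 : (kn : Int) + (d : Int) - (kn : Int) = ((d : Nat) : Int) := by ring
    have e2 : (kn : Int) + (d : Int) = (((kn + d : Nat)) : Int) := by push_cast; ring
    rw [e1, e2]
    simp only [PySem.List.pyGetD_natCast, List.getD_eq_getElem?_getD,
      List.getElem?_eq_getElem hdlen, List.getElem?_eq_getElem hkdlen, Option.getD_some]
    have c1 : pvCnt seq (d + 1 + kn) = pvCnt seq (d + kn) + (if seq[kn+d] == 1 then 1 else 0) := by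
      have := pvCnt_succ seq (kn + d) hkdlen
      rw [show d + 1 + kn = kn + d + 1 by omega, show d + kn = kn + d by omega]
      exact this
    have c2 : pvCnt seq (d + 1) = pvCnt seq d + (if seq[d] == 1 then 1 else 0) := pvCnt_succ seq d hdlen
    have key : (if (seq[kn+d] == 1) = true then
          (if (seq[d] == 1) = true then pvCnt seq (d + kn) - pvCnt seq d - 1 else pvCnt seq (d + kn) - pvCnt seq d) + 1
        else if (seq[d] == 1) = true then pvCnt seq (d + kn) - pvCnt seq d - 1 else pvCnt seq (d + kn) - pvCnt seq d)
        = pvCnt seq (d + 1 + kn) - pvCnt seq (d + 1) := by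
      rw [c1, c2]; split_ifs <;> ring
    rw [key]

-- reading off the prefix-count table
theorem pvPget (seq : List Int) (m : Nat) (h : m ≤ seq.length) :
    PySem.List.pyGetD ((List.range (seq.length + 1)).map (fun m => pvCnt seq m)) ((m : Nat) : Int) 0
    = pvCnt seq m := by
  rw [PySem.List.pyGetD_natCast]
  rw [List.getD_eq_getElem?_getD, List.getElem?_eq_getElem (by simpa using Nat.lt_succ_of_le h)]
  simp

-- ===== VERDICT (by name: the statement is the Claim_ definition above) =====
theorem so_so_1_spec : Claim_equal_so_so_1 := by
  intro n k seq _hdom hpre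
  obtain ⟨hk, hkl, hnl⟩ := hpre
  unfold Spec_so_so_1
  obtain ⟨kn, rfl⟩ : ∃ kn : Nat, (kn : Int) = k := ⟨k.toNat, Int.toNat_of_nonneg hk⟩
  have hknl : kn ≤ seq.length := by exact_mod_cast hkl
  simp only [so_so_1, so_so_1_alt, pvBuildP seq]
  rw [pvAfirst seq kn hknl, pvPget seq kn hknl]
  by_cases hnk : n ≤ (kn : Int)
  · rw [PySem.List.pyRange_one_eq_nil hnk, PySem.List.pyRange_one_eq_nil (by omega : n - kn + 1 ≤ 1)]
    simp
  · obtain ⟨d, hd⟩ : ∃ d : Nat, (d : Int) = n - kn := ⟨(n - kn).toNat, Int.toNat_of_nonneg (by omega)⟩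
    have hkd : kn + d ≤ seq.length := by omega
    have hn : n = (kn : Int) + (d : Int) := by omega
    rw [hn, pvAloop seq kn d hkd]
    have hr : PySem.List.pyRange 1 ((kn : Int) + (d : Int) - (kn : Int) + 1) 1
        = (List.range d).map (fun j : Nat => 1 + (j : Int)) := by
      rw [show (kn : Int) + (d : Int) - (kn : Int) + 1 = (d : Int) + 1 by ring,
        PySem.List.pyRange_one]
      rw [show ((d : Int) + 1 - 1).toNat = d by simp]
    rw [hr]
    dsimp only
    simp only [List.foldl_map]
    apply PySem.List.foldl_congr_mem
    intro b j hj
    have hjd : j < d := List.mem_range.mp hj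
    have e1 : 1 + (j : Int) + (kn : Int) = ((j + 1 + kn : Nat) : Int) := by push_cast; ring
    have e2 : (1 : Int) + (j : Int) = ((j + 1 : Nat) : Int) := by push_cast; ring
    rw [e1, e2, pvPget seq (j + 1 + kn) (by omega), pvPget seq (j + 1) (by omega)]
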